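-- pv_equiv track=rewrite | github.com/PFCS33/InsightEngine | query.py | get_related_headers
-- ===== SOURCE A (Python) =====
-- def get_related_headers(input_header, header_dict):
--     same_level_headers = []
--     elaboration_headers = []
--     generalization_headers = []
--     for header in header_dict:
--         if len(header) == len(input_header) and sum([1 for i, j in zip(header, input_header) if i == j]) == len(
--                 input_header) - 1:
--             same_level_headers.append(header)
--         if len(header) == len(input_header) - 1 and all(item in input_header for item in header):
--             elaboration_headers.append(header)
--         if len(header) == len(input_header) + 1 and all(item in header for item in input_header):
--             generalization_headers.append(header)
--     return same_level_headers, elaboration_headers, generalization_headers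
-- ===== SOURCE B (Python) =====
-- def _one_diff(h, ih):
--     # equal-length sequences differ in EXACTLY one position:
--     # walk to the first mismatch, then the remaining suffixes must agree
--     if not h or not ih:
--         return False
--     if h[0] != ih[0]:
--         return all(a == b for a, b in zip(h[1:], ih[1:]))
--     return _one_diff(h[1:], ih[1:])
--
--
-- def get_related_headers(input_header, header_dict):
--     L = len(input_header)
--     ih_set = set(input_header)
--     same_level_headers, elaboration_headers, generalization_headers = [], [], []
--     for header in header_dict:
--         n = len(header)
--         if n == L:
--             if _one_diff(header, input_header):
--                 same_level_headers.append(header)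
--         elif n == L - 1:
--             if set(header) <= ih_set:
--                 elaboration_headers.append(header)
--         elif n == L + 1:
--             if ih_set <= set(header):
--                 generalization_headers.append(header)
--     return same_level_headers, elaboration_headers, generalization_headers
-- ===== Notes on version B (the rewrite author's own statement) =====
-- stated objective: alternative
-- what changed: B replaces A's match-counting same-level test with a recursive find-first-mismatch-then-compare-suffixes check (early exit), replaces the per-item membership scans with set-subset tests against a precomputed set of the input header, and dispatches each header through an if/elif length chain instead of testing all three conditions on every header.
import Mathlib
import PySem

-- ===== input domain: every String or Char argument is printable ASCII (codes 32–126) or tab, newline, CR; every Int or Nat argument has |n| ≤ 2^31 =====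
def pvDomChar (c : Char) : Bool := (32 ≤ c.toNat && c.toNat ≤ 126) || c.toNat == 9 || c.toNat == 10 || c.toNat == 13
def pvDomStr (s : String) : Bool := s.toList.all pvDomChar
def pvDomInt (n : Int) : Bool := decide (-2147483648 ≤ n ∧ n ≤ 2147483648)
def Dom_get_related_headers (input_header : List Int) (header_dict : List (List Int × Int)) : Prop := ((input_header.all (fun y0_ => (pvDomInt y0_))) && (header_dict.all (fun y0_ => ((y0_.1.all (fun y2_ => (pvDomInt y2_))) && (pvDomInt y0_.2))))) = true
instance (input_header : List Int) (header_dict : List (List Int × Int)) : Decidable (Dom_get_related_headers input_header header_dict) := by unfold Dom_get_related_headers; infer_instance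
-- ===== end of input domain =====

-- B replaces match-counting by a find-first-mismatch/compare-suffixes recursion, membership scans
-- by set-subset tests, and dispatches on length via an if/elif chain; alternative decomposition, same cost.

-- ===== PORT A =====
-- helper: the match-count sum([1 for i, j in zip(header, input_header) if i == j])
def pvMatchCount (header input_header : List Int) : Int :=
  (((header.zip input_header).filter (fun p => p.1 == p.2)).map (fun _ => (1 : Int))).sum

-- the three conditions of A's loop (Python int comparisons, hence over Int)
def pvC1 (ih h : List Int) : Bool :=
  ((h.length : Int) == (ih.length : Int)) && (pvMatchCount h ih == (ih.length : Int) - 1)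
def pvC2 (ih h : List Int) : Bool :=
  ((h.length : Int) == (ih.length : Int) - 1) && h.all (fun item => ih.contains item)
def pvC3 (ih h : List Int) : Bool :=
  ((h.length : Int) == (ih.length : Int) + 1) && ih.all (fun item => h.contains item)

def get_related_headers (input_header : List Int) (header_dict : List (List Int × Int)) : List (List Int) × List (List Int) × List (List Int) :=
  header_dict.foldl
    (fun (acc : List (List Int) × List (List Int) × List (List Int)) kv =>
      let header := kv.1
      let acc := if pvC1 input_header header then (acc.1 ++ [header], acc.2.1, acc.2.2) else acc
      let acc := if pvC2 input_header header then (acc.1, acc.2.1 ++ [header], acc.2.2) else acc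
      let acc := if pvC3 input_header header then (acc.1, acc.2.1, acc.2.2 ++ [header]) else acc
      acc)
    ([], [], [])

-- ===== PORT B =====
-- def _one_diff(h, ih): recursion on both lists; at the first mismatch compare the suffixes elementwise
def pvOneDiff : List Int → List Int → Bool
  | [], _ => false
  | _, [] => false
  | x :: h, y :: ih =>
      if x != y then (h.zip ih).all (fun p => p.1 == p.2)
      else pvOneDiff h ih

def get_related_headers_alt (input_header : List Int) (header_dict : List (List Int × Int)) : List (List Int) × List (List Int) × List (List Int) :=
  let L : Int := input_header.length
  let ihSet : PySem.Set Int := PySem.Set.ofList input_header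
  header_dict.foldl
    (fun (acc : List (List Int) × List (List Int) × List (List Int)) kv =>
      let header := kv.1
      let n : Int := header.length
      if n == L then
        if pvOneDiff header input_header then (acc.1 ++ [header], acc.2.1, acc.2.2) else acc
      else if n == L - 1 then
        if PySem.Set.issubset (PySem.Set.ofList header) ihSet then (acc.1, acc.2.1 ++ [header], acc.2.2) else acc
      else if n == L + 1 then
        if PySem.Set.issubset ihSet (PySem.Set.ofList header) then (acc.1, acc.2.1, acc.2.2 ++ [header]) else acc
      else acc)
    ([], [], [])

-- ===== PRECONDITION & SPEC =====
def Spec_get_related_headers (input_header : List Int) (header_dict : List (List Int × Int)) (out : List (List Int) × List (List Int) × List (List Int)) : Prop := out = get_related_headers_alt input_header header_dict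
instance (input_header : List Int) (header_dict : List (List Int × Int)) (out : List (List Int) × List (List Int) × List (List Int)) : Decidable (Spec_get_related_headers input_header header_dict out) := by unfold Spec_get_related_headers; infer_instance

-- ===== CLAIM =====
def Claim_equal_get_related_headers : Prop := ∀ (input_header : List Int) (header_dict : List (List Int × Int)), Dom_get_related_headers input_header header_dict → Spec_get_related_headers input_header header_dict (get_related_headers input_header header_dict)

-- ===== LEMMAS AND PROOFS =====

-- B's branch predicates as standalone booleans
def qB1 (ih h : List Int) : Bool :=
  ((h.length : Int) == (ih.length : Int)) && pvOneDiff h ih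
def qB2 (ih h : List Int) : Bool :=
  (!((h.length : Int) == (ih.length : Int))) && ((h.length : Int) == (ih.length : Int) - 1)
    && PySem.Set.issubset (PySem.Set.ofList h) (PySem.Set.ofList ih)
def qB3 (ih h : List Int) : Bool :=
  (!((h.length : Int) == (ih.length : Int))) && (!((h.length : Int) == (ih.length : Int) - 1))
    && ((h.length : Int) == (ih.length : Int) + 1)
    && PySem.Set.issubset (PySem.Set.ofList ih) (PySem.Set.ofList h)

-- A's fold is three filters over the keys of header_dict
theorem foldA_eq (ih : List Int) (hd : List (List Int × Int))
    (a b c : List (List Int)) :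
    hd.foldl
      (fun (acc : List (List Int) × List (List Int) × List (List Int)) kv =>
        let header := kv.1
        let acc := if pvC1 ih header then (acc.1 ++ [header], acc.2.1, acc.2.2) else acc
        let acc := if pvC2 ih header then (acc.1, acc.2.1 ++ [header], acc.2.2) else acc
        let acc := if pvC3 ih header then (acc.1, acc.2.1, acc.2.2 ++ [header]) else acc
        acc)
      (a, b, c)
    = (a ++ (hd.map Prod.fst).filter (pvC1 ih),
       b ++ (hd.map Prod.fst).filter (pvC2 ih),
       c ++ (hd.map Prod.fst).filter (pvC3 ih)) := by
  induction hd generalizing a b c with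
  | nil => simp
  | cons kv t ih' =>
      simp only [List.foldl_cons, List.map_cons, List.filter_cons]
      rw [ih']
      by_cases h1 : pvC1 ih kv.1 <;> by_cases h2 : pvC2 ih kv.1 <;> by_cases h3 : pvC3 ih kv.1 <;>
        simp [h1, h2, h3]

-- B's fold is three filters too (its elif chain flattened into qB1/qB2/qB3)
theorem foldB_eq (ih : List Int) (hd : List (List Int × Int))
    (a b c : List (List Int)) :
    hd.foldl
      (fun (acc : List (List Int) × List (List Int) × List (List Int)) kv =>
        let header := kv.1
        let n : Int := header.length
        if n == (ih.length : Int) then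
          if pvOneDiff header ih then (acc.1 ++ [header], acc.2.1, acc.2.2) else acc
        else if n == (ih.length : Int) - 1 then
          if PySem.Set.issubset (PySem.Set.ofList header) (PySem.Set.ofList ih) then (acc.1, acc.2.1 ++ [header], acc.2.2) else acc
        else if n == (ih.length : Int) + 1 then
          if PySem.Set.issubset (PySem.Set.ofList ih) (PySem.Set.ofList header) then (acc.1, acc.2.1, acc.2.2 ++ [header]) else acc
        else acc)
      (a, b, c)
    = (a ++ (hd.map Prod.fst).filter (qB1 ih),
       b ++ (hd.map Prod.fst).filter (qB2 ih),
       c ++ (hd.map Prod.fst).filter (qB3 ih)) := by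
  induction hd generalizing a b c with
  | nil => simp
  | cons kv t ih' =>
      simp only [List.foldl_cons, List.map_cons, List.filter_cons]
      rw [ih']
      by_cases h1 : ((kv.1.length : Int) == (ih.length : Int)) = true <;>
        by_cases h2 : ((kv.1.length : Int) == (ih.length : Int) - 1) = true <;>
        by_cases h3 : ((kv.1.length : Int) == (ih.length : Int) + 1) = true <;>
        by_cases o1 : pvOneDiff kv.1 ih = true <;>
        by_cases s2 : PySem.Set.issubset (PySem.Set.ofList kv.1) (PySem.Set.ofList ih) = true <;>
        by_cases s3 : PySem.Set.issubset (PySem.Set.ofList ih) (PySem.Set.ofList kv.1) = true <;>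
        simp [qB1, qB2, qB3, h1, h2, h3, o1, s2, s3]

theorem mc_nil_right (h : List Int) : pvMatchCount h [] = 0 := by
  cases h <;> simp [pvMatchCount]

theorem mc_cons (x y : Int) (h ih : List Int) :
    pvMatchCount (x :: h) (y :: ih) =
      (if x == y then 1 else 0) + pvMatchCount h ih := by
  simp only [pvMatchCount, List.zip_cons_cons, List.filter_cons]
  by_cases e : (x == y) = true <;> simp [e]

theorem mc_le (h ih : List Int) : pvMatchCount h ih ≤ (ih.length : Int) := by
  induction h generalizing ih with
  | nil =>
      cases ih with
      | nil => simp [pvMatchCount]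
      | cons y t => simp [pvMatchCount]; positivity
  | cons x h' IH =>
      cases ih with
      | nil => simp [mc_nil_right]
      | cons y ih' =>
          have := IH ih'
          rw [mc_cons]
          by_cases e : (x == y) = true <;> simp [e] <;> omega

theorem mc_eq_len_iff (h ih : List Int) (hl : h.length = ih.length) :
    pvMatchCount h ih = (ih.length : Int) ↔ h = ih := by
  induction h generalizing ih with
  | nil =>
      cases ih with
      | nil => simp [pvMatchCount]
      | cons y ih' => simp at hl
  | cons x h' IH =>
      cases ih with
      | nil => simp at hl
      | cons y ih' =>
          have hl' : h'.length = ih'.length := by simpa using hl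
          have hle := mc_le h' ih'
          have hiff := IH ih' hl'
          rw [mc_cons]
          by_cases hx : x = y
          · subst hx
            simp only [List.length_cons, List.cons.injEq, true_and, beq_self_eq_true, if_true]
            push_cast
            constructor
            · intro hh; exact hiff.1 (by omega)
            · intro hh; have := hiff.2 hh; omega
          · have e : (x == y) = false := by simp [hx]
            simp only [e, Bool.false_eq_true, if_false, List.length_cons, List.cons.injEq]
            push_cast
            constructor
            · intro hh; exfalso; omega
            · intro hh; exact absurd hh.1 hx

theorem zipall_iff (h ih : List Int) (hl : h.length = ih.length) :
    ((h.zip ih).all (fun p => p.1 == p.2) = true) ↔ h = ih := by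
  induction h generalizing ih with
  | nil =>
      cases ih with
      | nil => simp
      | cons y ih' => simp at hl
  | cons x h' IH =>
      cases ih with
      | nil => simp at hl
      | cons y ih' =>
          have hl' : h'.length = ih'.length := by simpa using hl
          simp [List.cons.injEq, IH ih' hl']

theorem oneDiff_eq (h ih : List Int) (hl : h.length = ih.length) :
    pvOneDiff h ih = (pvMatchCount h ih == (ih.length : Int) - 1) := by
  induction h generalizing ih with
  | nil =>
      cases ih with
      | nil => simp [pvOneDiff, pvMatchCount]
      | cons y ih' => simp at hl
  | cons x h' IH =>
      cases ih with
      | nil => simp at hl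
      | cons y ih' =>
          have hl' : h'.length = ih'.length := by simpa using hl
          rw [Bool.eq_iff_iff]
          by_cases hx : x = y
          · subst hx
            simp only [pvOneDiff, bne_self_eq_false, Bool.false_eq_true, if_false, mc_cons,
              beq_self_eq_true, if_true, List.length_cons, IH ih' hl']
            push_cast
            simp only [beq_iff_eq]
            omega
          · have e : (x == y) = false := by simp [hx]
            have hne : (x != y) = true := by simp [hx]
            simp only [pvOneDiff, hne, if_true, mc_cons, e, Bool.false_eq_true, if_false,
              List.length_cons]
            rw [zipall_iff h' ih' hl', ← mc_eq_len_iff h' ih' hl']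
            push_cast
            simp only [beq_iff_eq]
            omega

-- pointwise predicate equalities
theorem c1_eq (ih h : List Int) : pvC1 ih h = qB1 ih h := by
  unfold pvC1 qB1
  by_cases hl : ((h.length : Int) == (ih.length : Int)) = true
  · have : h.length = ih.length := by simpa using hl
    rw [hl, oneDiff_eq h ih this]
  · simp [hl]

theorem c2_eq (ih h : List Int) : pvC2 ih h = qB2 ih h := by
  unfold pvC2 qB2
  by_cases hl : ((h.length : Int) == (ih.length : Int) - 1) = true
  · have h1 : (h.length : Int) = (ih.length : Int) - 1 := by simpa using hl
    have hne : ((h.length : Int) == (ih.length : Int)) = false := by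
      simp only [beq_eq_false_iff_ne, ne_eq]; omega
    rw [hl, hne]
    simp only [Bool.not_false, Bool.true_and, Bool.and_true]
    rw [Bool.eq_iff_iff]
    simp [PySem.Set.issubset_iff, List.all_eq_true, PySem.Set.mem_ofList]
  · simp [hl]

theorem c3_eq (ih h : List Int) : pvC3 ih h = qB3 ih h := by
  unfold pvC3 qB3
  by_cases hl : ((h.length : Int) == (ih.length : Int) + 1) = true
  · have h1 : (h.length : Int) = (ih.length : Int) + 1 := by simpa using hl
    have hne : ((h.length : Int) == (ih.length : Int)) = false := by
      simp only [beq_eq_false_iff_ne, ne_eq]; omega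
    have hne2 : ((h.length : Int) == (ih.length : Int) - 1) = false := by
      simp only [beq_eq_false_iff_ne, ne_eq]; omega
    rw [hl, hne, hne2]
    simp only [Bool.not_false, Bool.true_and, Bool.and_true]
    rw [Bool.eq_iff_iff]
    simp [PySem.Set.issubset_iff, List.all_eq_true, PySem.Set.mem_ofList]
  · simp [hl]

-- ===== VERDICT =====
theorem get_related_headers_spec : Claim_equal_get_related_headers := by
  intro ih hd _
  unfold Spec_get_related_headers get_related_headers get_related_headers_alt
  simp only []
  rw [foldA_eq, foldB_eq]
  simp only [List.nil_append]
  refine Prod.ext ?_ (Prod.ext ?_ ?_) <;> simp only []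
  · exact List.filter_congr (fun a _ => c1_eq ih a)
  · exact List.filter_congr (fun a _ => c2_eq ih a)
  · exact List.filter_congr (fun a _ => c3_eq ih a)
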